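-- pv_equiv track=rewrite | github.com/gkundlatsch/TerSP-TerFac | sequence_generator_maximum1.4.py | initial_gc_count
-- ===== SOURCE A (Python) =====
-- def initial_gc_count(sequence):
--     """
--     Count how many consecutive nucleotides at the start of the sequence are either G or C.
--     """
--     count = 0
--     for nt in sequence:
--         if nt in ['C', 'G']:
--             count += 1
--         else:
--             break
--     return count
-- ===== SOURCE B (Python) =====
-- def initial_gc_count(sequence):
--     """
--     Count how many consecutive nucleotides at the start of the sequence are either G or C.
--
--     Binary search for the largest k such that sequence[:k] consists only of
--     'C'/'G' (the predicate "the first k characters are all C/G" is monotone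
--     in k, so the boundary is found by bisection).
--     """
--     lo, hi = 0, len(sequence)
--     while lo < hi:
--         mid = (lo + hi + 1) // 2
--         if all(nt in 'CG' for nt in sequence[:mid]):
--             lo = mid
--         else:
--             hi = mid - 1
--     return lo
-- ===== Notes on version B (the rewrite author's own statement) =====
-- stated objective: alternative
-- what changed: Replaces A's linear break-on-mismatch counter loop with a binary search for the largest k whose length-k prefix is all C/G (the predicate is monotone in k), checking each candidate prefix wholesale with all().
import Mathlib
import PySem

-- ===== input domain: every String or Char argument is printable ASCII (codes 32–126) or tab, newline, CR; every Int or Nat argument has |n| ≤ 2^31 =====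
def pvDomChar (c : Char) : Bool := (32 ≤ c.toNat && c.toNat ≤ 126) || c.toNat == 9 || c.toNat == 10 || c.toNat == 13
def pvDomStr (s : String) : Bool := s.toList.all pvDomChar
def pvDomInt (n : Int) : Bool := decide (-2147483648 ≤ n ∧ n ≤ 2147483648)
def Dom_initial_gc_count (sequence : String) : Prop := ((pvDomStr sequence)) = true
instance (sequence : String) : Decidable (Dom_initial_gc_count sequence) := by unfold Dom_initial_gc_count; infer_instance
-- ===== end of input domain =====

-- B replaces A's linear counter loop with a binary search for the largest k whose
-- length-k prefix is all C/G (alternative algorithm, not faster).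


-- ===== PORT A =====
-- the for-loop with its count accumulator and break
def pvAGo : List Char → Int → Int
  | [], count => count
  | nt :: rest, count => if nt = 'C' || nt = 'G' then pvAGo rest (count + 1) else count

def initial_gc_count (sequence : String) : Int := pvAGo sequence.toList 0

-- ===== PORT B =====
-- nt in 'CG'
def pvP (c : Char) : Bool := c = 'C' || c = 'G'

-- the while lo < hi bisection loop; lo and hi stay in 0..len, so Nat with Nat
-- division matches Python's nonnegative (lo+hi+1)//2 exactly; sequence[:mid]
-- with 0 ≤ mid is List.take mid (exact for nonnegative upper-bound slices)
def pvBSearch (l : List Char) (lo hi : Nat) : Nat :=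
  if _h : lo < hi then
    let mid := (lo + hi + 1) / 2
    if (l.take mid).all pvP then pvBSearch l mid hi
    else pvBSearch l lo (mid - 1)
  else lo
termination_by hi - lo
decreasing_by all_goals omega

def initial_gc_count_alt (sequence : String) : Int :=
  (pvBSearch sequence.toList 0 sequence.toList.length : Int)

-- ===== PRECONDITION & SPEC =====
def Spec_initial_gc_count (sequence : String) (out : Int) : Prop := out = initial_gc_count_alt sequence
instance (sequence : String) (out : Int) : Decidable (Spec_initial_gc_count sequence out) := by unfold Spec_initial_gc_count; infer_instance

-- ===== CLAIM (what is proved, stated in full; the proofs are below) =====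
def Claim_equal_initial_gc_count : Prop := ∀ (sequence : String), Dom_initial_gc_count sequence → Spec_initial_gc_count sequence (initial_gc_count sequence)

-- ===== LEMMAS AND PROOFS =====
-- A's loop computes count + (length of the maximal C/G prefix)
theorem pvAGo_eq (l : List Char) (count : Int) :
    pvAGo l count = count + ((l.takeWhile pvP).length : Int) := by
  induction l generalizing count with
  | nil => simp [pvAGo]
  | cons nt rest ih =>
    by_cases h : pvP nt
    · have h' : (nt = 'C' || nt = 'G') = true := h
      simp only [pvAGo, h', if_pos, List.takeWhile_cons, h, List.length_cons]
      rw [ih]; push_cast; ring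
    · have h' : ¬ ((nt = 'C' || nt = 'G') = true) := h
      simp [pvAGo, h', h]

-- the length-m prefix is all-C/G iff m is below the takeWhile boundary (m within range)
theorem take_all_iff (l : List Char) (m : Nat) (hm : m ≤ l.length) :
    (l.take m).all pvP = true ↔ m ≤ (l.takeWhile pvP).length := by
  induction l generalizing m with
  | nil => simp at hm; simp [hm]
  | cons c rest ih =>
    cases m with
    | zero => simp
    | succ m =>
      by_cases h : pvP c
      · simp only [List.take_succ_cons, List.all_cons, h, Bool.true_and]
        rw [List.takeWhile_cons_of_pos h, List.length_cons,
          ih m (by simpa using hm)]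
        omega
      · have hb : pvP c = false := by simpa using h
        simp [List.take_succ_cons, hb]

-- the bisection, started with the boundary bracketed, lands on the boundary
theorem pvBSearch_eq (l : List Char) (lo hi : Nat)
    (h1 : lo ≤ (l.takeWhile pvP).length) (h2 : (l.takeWhile pvP).length ≤ hi)
    (h3 : hi ≤ l.length) :
    pvBSearch l lo hi = (l.takeWhile pvP).length := by
  induction lo, hi using pvBSearch.induct l with
  | case1 lo hi hlt mid hall ih =>
    rw [pvBSearch, dif_pos hlt]
    show (if (l.take mid).all pvP then pvBSearch l mid hi else pvBSearch l lo (mid - 1)) = _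
    rw [if_pos hall]
    exact ih ((take_all_iff l mid (by omega)).mp hall) h2 h3
  | case2 lo hi hlt mid hall ih =>
    rw [pvBSearch, dif_pos hlt]
    show (if (l.take mid).all pvP then pvBSearch l mid hi else pvBSearch l lo (mid - 1)) = _
    rw [if_neg hall]
    refine ih h1 ?_ (by omega)
    have := (take_all_iff l mid (by omega)).not.mp hall
    omega
  | case3 lo hi hlt =>
    rw [pvBSearch, dif_neg hlt]
    omega

-- ===== VERDICT (by name: the statement is the Claim_ definition above) =====
theorem initial_gc_count_spec : Claim_equal_initial_gc_count := by
  intro sequence _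
  unfold Spec_initial_gc_count initial_gc_count initial_gc_count_alt
  rw [pvAGo_eq, pvBSearch_eq sequence.toList 0 sequence.toList.length
    (Nat.zero_le _) ((List.takeWhile_prefix _).length_le) (le_refl _)]
  ring
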